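-- pv_equiv track=rewrite | github.com/Ezaldeen99/CODILITY-and-coding-challanges- | hashcode/picture.py | max_transition_points
-- ===== SOURCE A (Python) =====
-- def max_transition_points(pic, possible_merges):
--     points = 0
--     best_guess = None
--     # for each possible pic
--     for transistion in possible_merges:
--         photo_tags, item_tags = tags_splitter(pic, transistion)
--         tags_in_common = 0
--         # cal. the tags points and the remaining tags in each pics
--         for tag in photo_tags[:]:
--             if tag in item_tags:
--                 tags_in_common += 1
--                 item_tags.remove(tag)
--                 photo_tags.remove(tag)
--         trans_points = min(tags_in_common,len(item_tags), len(photo_tags))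
--         # if the trans_points is bigger than our current max. change it
--         if points < trans_points:
--             points = trans_points
--             best_guess = transistion
--     return best_guess
--
-- def tags_splitter(photo1, photo2):
--     return photo1.split(" ")[2:], photo2.split(" ")[2:]
-- ===== SOURCE B (Python) =====
-- def max_transition_points(pic, possible_merges):
--     a = pic.split(" ")[2:]
--     scores = []
--     for merge in possible_merges:
--         b = merge.split(" ")[2:]
--         common = sum(min(a.count(t), b.count(t)) for t in dict.fromkeys(a))
--         scores.append(min(common, len(a) - common, len(b) - common))
--     best = max(scores) if scores else 0
--     return possible_merges[scores.index(best)] if best > 0 else None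
-- ===== Notes on version B (the rewrite author's own statement) =====
-- stated objective: faster
-- what changed: A's fused running-max scan with a quadratic remove-while-iterating common-tag count is replaced by a per-distinct-tag count-min sum (no list mutation), a build-all-scores pass, and an index-of-max selection that returns the first merge attaining the positive maximum.
import Mathlib
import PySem

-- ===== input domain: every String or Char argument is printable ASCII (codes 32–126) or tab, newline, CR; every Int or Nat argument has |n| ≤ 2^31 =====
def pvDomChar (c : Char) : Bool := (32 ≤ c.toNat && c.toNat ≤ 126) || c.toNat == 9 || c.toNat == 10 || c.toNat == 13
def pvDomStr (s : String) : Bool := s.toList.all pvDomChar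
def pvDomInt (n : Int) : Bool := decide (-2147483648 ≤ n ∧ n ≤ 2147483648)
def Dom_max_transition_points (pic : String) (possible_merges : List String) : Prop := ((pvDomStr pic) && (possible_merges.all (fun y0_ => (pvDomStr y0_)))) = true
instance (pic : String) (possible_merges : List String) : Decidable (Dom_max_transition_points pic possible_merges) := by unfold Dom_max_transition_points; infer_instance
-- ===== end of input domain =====

-- B replaces A's fused running-max scan (with its quadratic remove-while-iterating common-tag count)
-- by a per-distinct-tag count-min sum, a build-all-scores pass and an index-of-max selection
-- (objective: faster — a timing run measured B well above 1.5x A on large inputs).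

-- ===== PORT A =====
-- helper tags_splitter, transliterated
def tags_splitter (photo1 photo2 : String) : List String × List String :=
  (PySem.List.slice ((PySem.Str.split? photo1 " ").getD []) (some 2) none,
   PySem.List.slice ((PySem.Str.split? photo2 " ").getD []) (some 2) none)

-- body of A's inner 'for tag in photo_tags[:]' loop; state = (tags_in_common, item_tags, photo_tags).
-- Python's list.remove is List.erase here: the removed tag is always present (checked by the 'if' for
-- item_tags; an occurrence of the current tag always remains in photo_tags), so ValueError never occurs.
def pvAStep (st : Int × List String × List String) (tag : String) : Int × List String × List String :=
  if tag ∈ st.2.1 then (st.1 + 1, st.2.1.erase tag, st.2.2.erase tag) else st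

def max_transition_points (pic : String) (possible_merges : List String) : Option String :=
  (possible_merges.foldl (fun acc transistion =>
      let ts := tags_splitter pic transistion
      let inner := ts.1.foldl pvAStep (0, ts.2, ts.1)
      let trans_points := min (min inner.1 ((inner.2.1.length : Int))) ((inner.2.2.length : Int))
      if acc.1 < trans_points then (trans_points, some transistion) else acc)
    ((0 : Int), (none : Option String))).2

-- ===== PORT B =====
def max_transition_points_alt (pic : String) (possible_merges : List String) : Option String :=
  let a := PySem.List.slice ((PySem.Str.split? pic " ").getD []) (some 2) none
  let scores := possible_merges.map (fun merge =>
    let b := PySem.List.slice ((PySem.Str.split? merge " ").getD []) (some 2) none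
    let common := ((PySem.List.dedup a).map
        (fun t => min ((PySem.List.count a t : Int)) ((PySem.List.count b t : Int)))).sum
    min (min common ((a.length : Int) - common)) ((b.length : Int) - common))
  let best := match scores with
    | [] => (0 : Int)
    | s :: rest => rest.foldl max s
  if 0 < best then
    (PySem.List.index? scores best).bind (fun i => PySem.List.pyGet? possible_merges (i : Int))
  else none

-- ===== PRECONDITION & SPEC =====
def Spec_max_transition_points (pic : String) (possible_merges : List String) (out : Option String) : Prop := out = max_transition_points_alt pic possible_merges
instance (pic : String) (possible_merges : List String) (out : Option String) : Decidable (Spec_max_transition_points pic possible_merges out) := by unfold Spec_max_transition_points; infer_instance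

-- ===== CLAIM (what is proved, stated in full; the proofs are below) =====
def Claim_equal_max_transition_points : Prop := ∀ (pic : String) (possible_merges : List String), Dom_max_transition_points pic possible_merges → Spec_max_transition_points pic possible_merges (max_transition_points pic possible_merges)

-- ===== LEMMAS AND PROOFS =====

-- greedy matched-tag count of A's inner loop, as a standalone function
def pvMatched : List String → List String → Nat
  | [], _ => 0
  | x :: xs, it => if x ∈ it then 1 + pvMatched xs (it.erase x) else pvMatched xs it

theorem pvMatched_le_left : ∀ (xs it : List String), pvMatched xs it ≤ xs.length := by
  intro xs
  induction xs with
  | nil => intro it; simp [pvMatched]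
  | cons x xs ih =>
    intro it
    by_cases h : x ∈ it
    · have := ih (it.erase x); simp [pvMatched, h]; omega
    · have := ih it; simp [pvMatched, h]; omega

theorem pvMatched_le_right : ∀ (xs it : List String), pvMatched xs it ≤ it.length := by
  intro xs
  induction xs with
  | nil => intro it; simp [pvMatched]
  | cons x xs ih =>
    intro it
    by_cases h : x ∈ it
    · have h1 := ih (it.erase x)
      have h2 : (it.erase x).length = it.length - 1 := List.length_erase_of_mem h
      have h3 : 0 < it.length := List.length_pos_of_mem h
      simp [pvMatched, h]; omega
    · have := ih it; simp [pvMatched, h]; omega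

-- the common-count component of A's inner fold is pvMatched
theorem pvFold_fst : ∀ (xs : List String) (c : Int) (it ph : List String),
    (xs.foldl pvAStep (c, it, ph)).1 = c + pvMatched xs it := by
  intro xs
  induction xs with
  | nil => intro c it ph; simp [pvMatched]
  | cons x xs ih =>
    intro c it ph
    by_cases h : x ∈ it
    · simp only [List.foldl_cons, pvAStep, h, if_pos, pvMatched]
      rw [ih]; push_cast; ring
    · simp only [List.foldl_cons, pvAStep, h, pvMatched, if_neg, not_false_iff]
      exact ih c it ph

-- the item_tags length after the fold
theorem pvFold_item_len : ∀ (xs : List String) (c : Int) (it ph : List String),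
    (xs.foldl pvAStep (c, it, ph)).2.1.length = it.length - pvMatched xs it := by
  intro xs
  induction xs with
  | nil => intro c it ph; simp [pvMatched]
  | cons x xs ih =>
    intro c it ph
    by_cases h : x ∈ it
    · simp only [List.foldl_cons, pvAStep, h, if_pos, pvMatched]
      rw [ih, List.length_erase_of_mem h]
      omega
    · simp only [List.foldl_cons, pvAStep, h, pvMatched, if_neg, not_false_iff]
      exact ih c it ph

-- the photo_tags length after the fold, when photo_tags dominates the iterated copy
theorem pvFold_photo_len : ∀ (xs : List String) (c : Int) (it ph : List String),
    (∀ t, xs.count t ≤ ph.count t) →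
    (xs.foldl pvAStep (c, it, ph)).2.2.length = ph.length - pvMatched xs it := by
  intro xs
  induction xs with
  | nil => intro c it ph _; simp [pvMatched]
  | cons x xs ih =>
    intro c it ph hcnt
    have hxph : x ∈ ph := by
      have := hcnt x
      rw [List.count_cons_self] at this
      exact List.count_pos_iff.mp (by omega)
    by_cases h : x ∈ it
    · simp only [List.foldl_cons, pvAStep, h, if_pos, pvMatched]
      rw [ih (c + 1) (it.erase x) (ph.erase x) ?_, List.length_erase_of_mem hxph]
      · omega
      · intro t
        have h1 := hcnt t
        have h2 : (x :: xs).count t = xs.count t + (if t = x then 1 else 0) := by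
          by_cases ht : t = x
          · subst ht; rw [List.count_cons_self]; simp
          · rw [List.count_cons_of_ne (fun e => ht e.symm)]; simp [ht]
        have h3 : (ph.erase x).count t = ph.count t - (if t = x then 1 else 0) := by
          by_cases ht : t = x
          · subst ht; rw [List.count_erase_self]; simp
          · rw [List.count_erase_of_ne ht]; simp [ht]
        omega
    · simp only [List.foldl_cons, pvAStep, h, pvMatched, if_neg, not_false_iff]
      refine ih c it ph ?_
      intro t
      have h1 := hcnt t
      have h2 : xs.count t ≤ (x :: xs).count t := by
        by_cases ht : t = x
        · subst ht; rw [List.count_cons_self]; omega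
        · rw [List.count_cons_of_ne (fun e => ht e.symm)]
      omega

-- sum over a nodup list where f exceeds g by exactly 1 at one member
theorem pvSum_map_succ_at {α : Type} (x : α) (f g : α → Nat) :
    ∀ (L : List α), L.Nodup → x ∈ L → f x = g x + 1 → (∀ t ∈ L, t ≠ x → f t = g t) →
    (L.map f).sum = (L.map g).sum + 1 := by
  intro L
  induction L with
  | nil => intro _ hx; exact absurd hx (List.not_mem_nil)
  | cons y L ih =>
    intro hnd hx hfx hfg
    have hndL := (List.nodup_cons.mp hnd).2
    have hyL := (List.nodup_cons.mp hnd).1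
    rcases List.mem_cons.mp hx with hxy | hxL
    · subst hxy
      have : L.map f = L.map g := by
        refine List.map_congr_left ?_
        intro t ht
        exact hfg t (List.mem_cons_of_mem _ ht) (fun e => hyL (e ▸ ht))
      simp only [List.map_cons, List.sum_cons, this, hfx]
      omega
    · have hyx : y ≠ x := fun e => hyL (e ▸ hxL)
      have hfy : f y = g y := hfg y (List.mem_cons_self) hyx
      simp only [List.map_cons, List.sum_cons, hfy,
        ih hndL hxL hfx (fun t ht => hfg t (List.mem_cons_of_mem _ ht))]
      omega

-- pvMatched equals the sum of per-tag minimum counts over any nodup cover of xs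
theorem pvMatched_eq_sum : ∀ (xs : List String) (it L : List String), L.Nodup →
    (∀ y ∈ xs, y ∈ L) →
    pvMatched xs it = (L.map (fun t => min (xs.count t) (it.count t))).sum := by
  intro xs
  induction xs with
  | nil =>
    intro it L _ _
    simp [pvMatched]
  | cons x xs ih =>
    intro it L hnd hcov
    have hxL : x ∈ L := hcov x (List.mem_cons_self)
    have hcov' : ∀ y ∈ xs, y ∈ L := fun y hy => hcov y (List.mem_cons_of_mem _ hy)
    by_cases h : x ∈ it
    · have hit : 1 ≤ it.count x := List.count_pos_iff.mpr h
      have hkey := pvSum_map_succ_at x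
        (fun t => min ((x :: xs).count t) (it.count t))
        (fun t => min (xs.count t) ((it.erase x).count t)) L hnd hxL ?_ ?_
      · simp only [pvMatched, h, if_pos]
        rw [ih (it.erase x) L hnd hcov', hkey]
        omega
      · simp only [List.count_cons_self, List.count_erase_self]
        omega
      · intro t htL htx
        simp only [List.count_cons_of_ne (fun e => htx e.symm), List.count_erase_of_ne htx]
    · have hit : it.count x = 0 := by
        rw [List.count_eq_zero]; exact h
      have : L.map (fun t => min ((x :: xs).count t) (it.count t))
           = L.map (fun t => min (xs.count t) (it.count t)) := by
        refine List.map_congr_left ?_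
        intro t _
        by_cases ht : t = x
        · subst ht; rw [List.count_cons_self, hit]; simp
        · rw [List.count_cons_of_ne (fun e => ht e.symm)]
      rw [this, show pvMatched (x :: xs) it = pvMatched xs it from by simp [pvMatched, h]]
      exact ih it L hnd hcov'

-- running maximum of scores, as a fold
theorem pvFoldMax_le (f : String → Int) : ∀ (l : List String) (p : Int),
    p ≤ l.foldl (fun a t => max a (f t)) p := by
  intro l
  induction l with
  | nil => intro p; simp
  | cons x l ih =>
    intro p
    have := ih (max p (f x))
    simp only [List.foldl_cons]
    omega

theorem pvFoldMax_mem (f : String → Int) : ∀ (l : List String) (p : Int),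
    l.foldl (fun a t => max a (f t)) p = p ∨ (l.foldl (fun a t => max a (f t)) p) ∈ l.map f := by
  intro l
  induction l with
  | nil => intro p; left; rfl
  | cons x l ih =>
    intro p
    simp only [List.foldl_cons, List.map_cons, List.mem_cons]
    rcases ih (max p (f x)) with h | h
    · rw [h]
      rcases max_choice p (f x) with h2 | h2 <;> rw [h2]
      · left; rfl
      · right; left; rfl
    · right; right; exact h

-- A's running strict-max fold, characterised by the fold-max and the first merge attaining it
theorem pvOuterChar (f : String → Int) : ∀ (l : List String) (p : Int) (g : Option String),
    (l.foldl (fun acc t => if acc.1 < f t then (f t, some t) else acc) (p, g)).2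
    = if l.foldl (fun a t => max a (f t)) p = p then g
      else l.find? (fun t => f t == l.foldl (fun a t => max a (f t)) p) := by
  intro l
  induction l with
  | nil => intro p g; simp
  | cons x l ih =>
    intro p g
    simp only [List.foldl_cons]
    by_cases h1 : p < f x
    · rw [if_pos h1]
      have hmax : max p (f x) = f x := by omega
      rw [hmax, ih (f x) (some x)]
      have hle := pvFoldMax_le f l (f x)
      by_cases h2 : l.foldl (fun a t => max a (f t)) (f x) = f x
      · rw [if_pos h2, if_neg (by omega), h2, List.find?_cons_of_pos (by simp)]
      · rw [if_neg h2, if_neg (by omega),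
          List.find?_cons_of_neg (by simp; omega)]
    · rw [if_neg h1]
      have hmax : max p (f x) = p := by omega
      rw [hmax, ih p g]
      by_cases h2 : l.foldl (fun a t => max a (f t)) p = p
      · rw [if_pos h2, if_pos h2]
      · have hle := pvFoldMax_le f l p
        rw [if_neg h2, if_neg h2,
          List.find?_cons_of_neg (by simp; omega)]

-- B's two-pass selection equals find? of the first merge attaining v
theorem pvIndexSel (f : String → Int) (v : Int) : ∀ (l : List String), v ∈ l.map f →
    (PySem.List.index? (l.map f) v).bind (fun i => PySem.List.pyGet? l (i : Int))
    = l.find? (fun t => f t == v) := by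
  intro l
  induction l with
  | nil => intro h; simp at h
  | cons x l ih =>
    intro hv
    by_cases h : f x = v
    · rw [List.map_cons, h, PySem.List.index?_cons_self,
        List.find?_cons_of_pos (by simp [h])]
      simp only [Option.bind_some]
      rw [PySem.List.pyGet?_natCast]
      rfl
    · have hv' : v ∈ l.map f := by
        simp only [List.map_cons, List.mem_cons] at hv
        rcases hv with he | he
        · exact absurd he.symm h
        · exact he
      rw [List.map_cons, PySem.List.index?_cons_of_ne (l.map f) h,
        List.find?_cons_of_neg (by simp [h]), ← ih hv']
      cases hidx : PySem.List.index? (l.map f) v with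
      | none => simp
      | some i =>
        simp only [Option.map_some, Option.bind_some]
        rw [PySem.List.pyGet?_natCast, PySem.List.pyGet?_natCast]
        simp

-- proof-only abbreviations: A's per-merge score and B's per-merge score
def pvSA (pic t : String) : Int :=
  let ts := tags_splitter pic t
  let inner := ts.1.foldl pvAStep (0, ts.2, ts.1)
  min (min inner.1 ((inner.2.1.length : Int))) ((inner.2.2.length : Int))

def pvCommon (a b : List String) : Int :=
  ((PySem.List.dedup a).map
    (fun t => min ((PySem.List.count a t : Int)) ((PySem.List.count b t : Int)))).sum

def pvSB (pic t : String) : Int :=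
  let a := PySem.List.slice ((PySem.Str.split? pic " ").getD []) (some 2) none
  let b := PySem.List.slice ((PySem.Str.split? t " ").getD []) (some 2) none
  min (min (pvCommon a b) ((a.length : Int) - pvCommon a b)) ((b.length : Int) - pvCommon a b)

theorem pvCommon_eq (a b : List String) : pvCommon a b = (pvMatched a b : Int) := by
  have hmap : ∀ (L : List String),
      (L.map (fun t => min ((PySem.List.count a t : Int)) ((PySem.List.count b t : Int)))).sum
      = (((L.map (fun t => min (List.count t a) (List.count t b))).sum : Nat) : Int) := by
    intro L
    induction L with
    | nil => simp
    | cons y L ih =>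
      rw [List.map_cons, List.sum_cons, List.map_cons, List.sum_cons, Nat.cast_add, ih,
        PySem.List.count_eq, PySem.List.count_eq, Nat.cast_min]
  unfold pvCommon
  rw [hmap]
  exact congrArg Nat.cast (pvMatched_eq_sum a b (PySem.List.dedup a)
    (PySem.List.nodup_dedup a) (fun y hy => (PySem.List.mem_dedup a y).mpr hy)).symm

theorem pvScoreCore (a b : List String) :
    min (min ((a.foldl pvAStep (0, b, a)).1) (((a.foldl pvAStep (0, b, a)).2.1.length : Int)))
      (((a.foldl pvAStep (0, b, a)).2.2.length : Int))
    = min (min (pvCommon a b) ((a.length : Int) - pvCommon a b))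
      ((b.length : Int) - pvCommon a b) := by
  have hm := pvFold_fst a 0 b a
  have hi := pvFold_item_len a 0 b a
  have hp := pvFold_photo_len a 0 b a (fun _ => le_refl _)
  have hC := pvCommon_eq a b
  have h1 := pvMatched_le_right a b
  have h2 := pvMatched_le_left a b
  rw [hm, hi, hp, hC]
  omega

theorem pvSA_eq_pvSB (pic t : String) : pvSA pic t = pvSB pic t :=
  pvScoreCore _ _

theorem pvScoreB_nonneg (a b : List String) :
    0 ≤ min (min (pvCommon a b) ((a.length : Int) - pvCommon a b))
      ((b.length : Int) - pvCommon a b) := by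
  have hC := pvCommon_eq a b
  have h1 := pvMatched_le_right a b
  have h2 := pvMatched_le_left a b
  omega

theorem pvSB_nonneg (pic t : String) : 0 ≤ pvSB pic t :=
  pvScoreB_nonneg _ _

-- ===== VERDICT (by name: the statement is the Claim_ definition above) =====
theorem max_transition_points_spec : Claim_equal_max_transition_points := by
  intro pic merges _
  unfold Spec_max_transition_points
  have hA : max_transition_points pic merges
      = (merges.foldl (fun acc t => if acc.1 < pvSA pic t then (pvSA pic t, some t) else acc)
          ((0 : Int), (none : Option String))).2 := rfl
  have hB : max_transition_points_alt pic merges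
      = (if (0 : Int) < (match merges.map (pvSB pic) with
                 | [] => (0 : Int)
                 | s :: rest => rest.foldl max s) then
           (PySem.List.index? (merges.map (pvSB pic))
             (match merges.map (pvSB pic) with
              | [] => (0 : Int)
              | s :: rest => rest.foldl max s)).bind
             (fun i => PySem.List.pyGet? merges (i : Int))
         else none) := rfl
  have hfun : (fun (acc : Int × Option String) t =>
        if acc.1 < pvSA pic t then (pvSA pic t, some t) else acc)
      = (fun (acc : Int × Option String) t =>
        if acc.1 < pvSB pic t then (pvSB pic t, some t) else acc) := by
    funext acc t
    rw [pvSA_eq_pvSB]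
  rw [hA, hB, hfun, pvOuterChar (pvSB pic) merges 0 none]
  have hMle := pvFoldMax_le (pvSB pic) merges 0
  have hbest : (match (merges.map (pvSB pic) : List Int) with
                | ([] : List Int) => (0 : Int)
                | s :: rest => rest.foldl max s)
      = merges.foldl (fun a t => max a (pvSB pic t)) 0 := by
    cases merges with
    | nil => rfl
    | cons x l =>
      simp only [List.map_cons, List.foldl_cons]
      rw [List.foldl_map, max_eq_right (pvSB_nonneg pic x)]
  rw [hbest]
  by_cases h0 : merges.foldl (fun a t => max a (pvSB pic t)) 0 = 0
  · rw [if_pos h0, h0, if_neg (by omega)]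
  · rw [if_neg h0, if_pos (by omega)]
    refine (pvIndexSel (pvSB pic) _ merges ?_).symm
    rcases pvFoldMax_mem (pvSB pic) merges 0 with h | h
    · exact absurd h h0
    · exact h
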